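-- pv_equiv track=rewrite | github.com/hyeonjun/AlgorithmTest | leetcode/532_K_diff_Pairs_in_an_Array.py | findPairs
-- ===== SOURCE A (Python) =====
-- def findPairs(nums: list[int], k: int) -> int:
--     from collections import Counter
--     answer = 0
--     cnt = Counter(nums)
--     for n in cnt:
--         if k > 0 and n-k in cnt or k == 0 and cnt[n] > 1:
--             answer += 1
--     return answer
-- ===== SOURCE B (Python) =====
-- def _dup_runs(s):
--     # s is sorted; count runs of length >= 2
--     count = 0
--     i = 0
--     n = len(s)
--     while i < n:
--         j = i + 1
--         while j < n and s[j] == s[i]: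
--             j += 1
--         if j - i > 1:
--             count += 1
--         i = j
--     return count
--
--
-- def _dedup_sorted(s):
--     # s is sorted; keep one copy of each value
--     u = []
--     for x in s:
--         if not u or u[-1] != x:
--             u.append(x)
--     return u
--
--
-- def _merge_count(a, b, k):
--     # a, b strictly increasing; count x in a with x - k in b
--     i = j = count = 0
--     while i < len(a) and j < len(b):
--         d = a[i] - (b[j] + k)
--         if d < 0:
--             i += 1
--         elif d > 0:
--             j += 1
--         else:
--             count += 1
--             i += 1
--             j += 1
--     return count
--
--
-- def findPairs(nums: list[int], k: int) -> int:
--     if k < 0: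
--         return 0
--     s = sorted(nums)
--     if k == 0:
--         return _dup_runs(s)
--     u = _dedup_sorted(s)
--     return _merge_count(u, u, k)
-- ===== Notes on version B (the rewrite author's own statement) =====
-- stated objective: alternative
-- what changed: Replaces the Counter frequency-map probing with an order-based strategy: sort the list, count duplicate runs for k==0, and sweep two pointers over the sorted distinct values (against themselves shifted by k) for k>0, returning 0 immediately for k<0.
import Mathlib
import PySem

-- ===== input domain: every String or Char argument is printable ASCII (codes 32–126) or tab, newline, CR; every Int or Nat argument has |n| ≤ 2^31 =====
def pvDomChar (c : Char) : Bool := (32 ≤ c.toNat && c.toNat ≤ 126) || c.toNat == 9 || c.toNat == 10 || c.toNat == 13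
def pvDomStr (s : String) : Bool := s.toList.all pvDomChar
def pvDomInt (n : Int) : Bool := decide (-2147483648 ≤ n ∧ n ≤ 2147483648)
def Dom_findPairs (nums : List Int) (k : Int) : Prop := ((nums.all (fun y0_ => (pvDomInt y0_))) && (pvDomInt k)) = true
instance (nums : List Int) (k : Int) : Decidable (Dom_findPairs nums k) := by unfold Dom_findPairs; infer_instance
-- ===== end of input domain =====

-- B replaces A's Counter-and-membership probing by a sort-based strategy (duplicate-run
-- scan for k == 0, a two-pointer merge over the sorted distinct values for k > 0);
-- an alternative algorithm of similar cost, not claimed faster.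

-- ===== PORT A =====
def findPairs (nums : List Int) (k : Int) : Int :=
  let cnt : PySem.Dict Int Int := PySem.Dict.counter nums
  cnt.keys.foldl
    (fun answer n =>
      if (decide (k > 0) && cnt.contains (n - k)) || (decide (k = 0) && decide (cnt.getD n 0 > 1))
      then answer + 1 else answer) 0

-- ===== PORT B =====
-- _dup_runs: the outer while walks run by run; the inner while that advances j over the
-- run of elements equal to s[i] is the takeWhile/dropWhile split of the tail
def dupRuns : List Int → Int
  | [] => 0
  | x :: t =>
    (if (t.takeWhile (fun y => y == x)).length + 1 > 1 then (1 : Int) else 0)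
      + dupRuns (t.dropWhile (fun y => y == x))
  termination_by s => s.length
  decreasing_by exact Nat.lt_succ_of_le (List.length_dropWhile_le _ t)

-- _dedup_sorted: append x unless it equals the last element kept
def dedupSorted (s : List Int) : List Int :=
  s.foldl (fun u x => if u = [] || u.getLast? ≠ some x then u ++ [x] else u) []

-- _merge_count: the two index pointers i, j become the two list suffixes
def mergeCount (k : Int) : List Int → List Int → Int
  | [], _ => 0
  | _ :: _, [] => 0
  | x :: a, y :: b =>
    if x - (y + k) < 0 then mergeCount k a (y :: b)
    else if x - (y + k) > 0 then mergeCount k (x :: a) b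
    else 1 + mergeCount k a b
  termination_by a b => a.length + b.length
  decreasing_by all_goals simp only [List.length_cons]; omega

def findPairs_alt (nums : List Int) (k : Int) : Int :=
  if k < 0 then 0
  else
    let s := PySem.List.sorted nums (fun x => x) false
    if k = 0 then dupRuns s
    else
      let u := dedupSorted s
      mergeCount k u u

-- ===== PRECONDITION & SPEC =====
def Spec_findPairs (nums : List Int) (k : Int) (out : Int) : Prop := out = findPairs_alt nums k
instance (nums : List Int) (k : Int) (out : Int) : Decidable (Spec_findPairs nums k out) := by unfold Spec_findPairs; infer_instance

-- ===== CLAIM (what is proved, stated in full; the proofs are below) =====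
def Claim_equal_findPairs : Prop := ∀ (nums : List Int) (k : Int), Dom_findPairs nums k → Spec_findPairs nums k (findPairs nums k)

-- ===== LEMMAS AND PROOFS =====

-- A's loop counts the distinct values passing the Counter test
theorem findPairs_eq_countP (nums : List Int) (k : Int) :
    findPairs nums k =
      ((PySem.Set.ofList nums).countP
        (fun n => (decide (k > 0) && decide ((n - k) ∈ nums)) ||
                  (decide (k = 0) && decide (nums.count n > 1))) : Int) := by
  show (PySem.Dict.counter nums : PySem.Dict Int Int).keys.foldl _ 0 = _
  rw [PySem.List.foldl_if_add_one, PySem.Dict.keys_counter, zero_add]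
  congr 1
  apply List.countP_congr
  intro n _
  simp [PySem.Dict.contains_counter, PySem.Dict.getD_counter]

-- the tail that dedupSorted's fold appends after an accumulator whose last element is x
def dsTail (x : Int) : List Int → List Int
  | [] => []
  | y :: t => if y = x then dsTail x t else y :: dsTail y t

theorem dsTail_foldl (s : List Int) : ∀ (u : List Int) (x : Int), u.getLast? = some x →
    s.foldl (fun u x => if u = [] || u.getLast? ≠ some x then u ++ [x] else u) u = u ++ dsTail x s := by
  induction s with
  | nil => intro u x _; simp [dsTail]
  | cons y s ih =>
    intro u x hu
    have hne : u ≠ [] := by intro h; simp [h] at hu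
    rw [List.foldl_cons]
    by_cases hyx : y = x
    · subst hyx
      have hstep : (if u = [] || u.getLast? ≠ some y then u ++ [y] else u) = u := by
        simp [hne, hu]
      rw [hstep, ih u y hu]
      simp [dsTail]
    · have hstep : (if u = [] || u.getLast? ≠ some y then u ++ [y] else u) = u ++ [y] := by
        have : u.getLast? ≠ some y := by rw [hu]; simp [Ne.symm hyx]
        simp [this]
      rw [hstep, ih (u ++ [y]) y (by simp)]
      simp [dsTail, hyx]

theorem dedupSorted_cons (x : Int) (t : List Int) :
    dedupSorted (x :: t) = x :: dsTail x t := by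
  have h := dsTail_foldl t [x] x (by simp)
  simpa [dedupSorted] using h

theorem mem_dsTail (s : List Int) : ∀ (x : Int), s.Pairwise (· ≤ ·) → (∀ y ∈ s, x ≤ y) →
    ∀ z, z ∈ dsTail x s ↔ (z ∈ s ∧ z ≠ x) := by
  induction s with
  | nil => intro x _ _ z; simp [dsTail]
  | cons y t ih =>
    intro x hs hx z
    have hxy : x ≤ y := hx y (List.mem_cons_self)
    have hyt : ∀ w ∈ t, y ≤ w := fun w hw => List.rel_of_pairwise_cons hs hw
    by_cases hyx : y = x
    · subst hyx
      rw [show dsTail y (y :: t) = dsTail y t by simp [dsTail]]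
      rw [ih y hs.of_cons hyt z]
      constructor
      · rintro ⟨h1, h2⟩; exact ⟨List.mem_cons_of_mem _ h1, h2⟩
      · rintro ⟨h1, h2⟩
        rcases List.mem_cons.mp h1 with h | h
        · exact absurd h h2
        · exact ⟨h, h2⟩
    · have hlt : x < y := lt_of_le_of_ne hxy (Ne.symm hyx)
      rw [show dsTail x (y :: t) = y :: dsTail y t by simp [dsTail, hyx]]
      rw [List.mem_cons, ih y hs.of_cons hyt z]
      constructor
      · rintro (rfl | ⟨h1, h2⟩)
        · exact ⟨List.mem_cons_self, hyx⟩
        · have : x < z := lt_of_lt_of_le hlt (hyt z h1)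
          exact ⟨List.mem_cons_of_mem _ h1, by omega⟩
      · rintro ⟨h1, h2⟩
        rcases List.mem_cons.mp h1 with rfl | h
        · exact Or.inl rfl
        · by_cases hzy : z = y
          · exact Or.inl hzy
          · exact Or.inr ⟨h, hzy⟩

theorem pairwise_dsTail (s : List Int) : ∀ (x : Int), s.Pairwise (· ≤ ·) → (∀ y ∈ s, x ≤ y) →
    (x :: dsTail x s).Pairwise (· < ·) := by
  induction s with
  | nil => intro x _ _; simp [dsTail]
  | cons y t ih =>
    intro x hs hx
    have hxy : x ≤ y := hx y (List.mem_cons_self)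
    have hyt : ∀ w ∈ t, y ≤ w := fun w hw => List.rel_of_pairwise_cons hs hw
    by_cases hyx : y = x
    · subst hyx
      rw [show dsTail y (y :: t) = dsTail y t by simp [dsTail]]
      exact ih y hs.of_cons hyt
    · have hlt : x < y := lt_of_le_of_ne hxy (Ne.symm hyx)
      rw [show dsTail x (y :: t) = y :: dsTail y t by simp [dsTail, hyx]]
      have hrec := ih y hs.of_cons hyt
      refine List.Pairwise.cons ?_ hrec
      intro z hz
      rcases List.mem_cons.mp hz with rfl | h
      · exact hlt
      · have := (mem_dsTail t y hs.of_cons hyt z).mp h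
        exact lt_of_lt_of_le hlt (hyt z this.1)

theorem mem_dedupSorted (s : List Int) (hs : s.Pairwise (· ≤ ·)) :
    ∀ z, z ∈ dedupSorted s ↔ z ∈ s := by
  intro z
  cases s with
  | nil => simp [dedupSorted]
  | cons x t =>
    rw [dedupSorted_cons, List.mem_cons,
      mem_dsTail t x hs.of_cons (fun y hy => List.rel_of_pairwise_cons hs hy) z, List.mem_cons]
    by_cases hzx : z = x <;> simp [hzx]

theorem pairwise_dedupSorted (s : List Int) (hs : s.Pairwise (· ≤ ·)) :
    (dedupSorted s).Pairwise (· < ·) := by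
  cases s with
  | nil => simp [dedupSorted]
  | cons x t =>
    rw [dedupSorted_cons]
    exact pairwise_dsTail t x hs.of_cons (fun y hy => List.rel_of_pairwise_cons hs hy)

-- the merge sweep over two strictly increasing lists counts the shifted common values
theorem mergeCount_eq (k : Int) : ∀ (N : Nat) (a b : List Int), a.length + b.length ≤ N →
    a.Pairwise (· < ·) → b.Pairwise (· < ·) →
    mergeCount k a b = (a.countP (fun n => decide ((n - k) ∈ b)) : Int) := by
  intro N
  induction N with
  | zero =>
    intro a b hN _ _
    have : a = [] := by cases a <;> simp_all
    subst this; simp [mergeCount]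
  | succ N ih =>
    intro a b hN ha hb
    match a, b with
    | [], _ => simp [mergeCount]
    | x :: a, [] => simp [mergeCount]
    | x :: a, y :: b =>
      have hya : ∀ w ∈ a, x < w := fun w hw => List.rel_of_pairwise_cons ha hw
      have hyb : ∀ w ∈ b, y < w := fun w hw => List.rel_of_pairwise_cons hb hw
      simp only [List.length_cons] at hN
      rw [mergeCount]
      by_cases h1 : x - (y + k) < 0
      · rw [if_pos h1, ih a (y :: b) (by simp; omega) ha.of_cons hb]
        have hb' : x - k ∉ b := fun h => by have := hyb _ h; omega
        have hy' : x - k ≠ y := by omega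
        rw [List.countP_cons]
        simp [List.mem_cons, hy', hb']
      · rw [if_neg h1]
        by_cases h2 : x - (y + k) > 0
        · rw [if_pos h2, ih (x :: a) b (by simp at hN ⊢; omega) ha hb.of_cons]
          congr 1
          refine List.countP_congr fun z hz => ?_
          have hxz : x ≤ z := by
            rcases List.mem_cons.mp hz with rfl | h
            · exact le_refl _
            · exact le_of_lt (hya z h)
          have hne : z - k ≠ y := by omega
          simp [List.mem_cons, hne]
        · rw [if_neg h2, ih a b (by omega) ha.of_cons hb.of_cons, List.countP_cons]
          have hx0 : x - k = y := by omega
          have hcongr : a.countP (fun n => decide ((n - k) ∈ y :: b)) = a.countP (fun n => decide ((n - k) ∈ b)) := by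
            refine List.countP_congr fun z hz => ?_
            have := hya z hz
            have hne : z - k ≠ y := by omega
            simp [List.mem_cons, hne]
          rw [hcongr]
          simp [List.mem_cons, hx0]
          ring

theorem dsTail_skip (x : Int) (l r : List Int) (h : ∀ y ∈ l, y = x) :
    dsTail x (l ++ r) = dsTail x r := by
  induction l with
  | nil => rfl
  | cons y l ih =>
    have hy : y = x := h y List.mem_cons_self
    simp only [List.cons_append, dsTail, if_pos hy]
    exact ih (fun z hz => h z (List.mem_cons_of_mem _ hz))

-- the run scan over a sorted list counts the distinct values of multiplicity > 1
theorem dupRuns_eq : ∀ (N : Nat) (s : List Int), s.length ≤ N → s.Pairwise (· ≤ ·) →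
    dupRuns s = ((dedupSorted s).countP (fun n => decide (s.count n > 1)) : Int) := by
  intro N
  induction N with
  | zero =>
    intro s hN _
    have : s = [] := by cases s <;> simp_all
    subst this; simp [dupRuns, dedupSorted]
  | succ N ih =>
    intro s hN hs
    match s with
    | [] => simp [dupRuns, dedupSorted]
    | x :: t =>
      have hxt : ∀ y ∈ t, x ≤ y := fun y hy => List.rel_of_pairwise_cons hs hy
      have ht : t.Pairwise (· ≤ ·) := hs.of_cons
      set run := t.takeWhile (fun y => y == x) with hrundef
      set r := t.dropWhile (fun y => y == x) with hrdef
      have hsplit : run ++ r = t := List.takeWhile_append_dropWhile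
      have hrun : ∀ y ∈ run, y = x := fun y hy => by
        have := List.mem_takeWhile_imp hy; simpa using this
      have hrt : ∀ z ∈ r, z ∈ t := fun z hz => by
        rw [← hsplit]; exact List.mem_append_right _ hz
      have hr : ∀ z ∈ r, x < z := by
        intro z hz
        cases hrr : r with
        | nil => rw [hrr] at hz; simp at hz
        | cons h r' =>
          have hhd : (List.dropWhile (fun y => y == x) t).head? = some h := by
            rw [← hrdef, hrr]; rfl
          have hh := List.head?_dropWhile_not (p := fun y => y == x) (l := t); rw [hhd] at hh; simp at hh
          have hhx : h ≠ x := hh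
          have hhmem : h ∈ t := hrt h (by rw [hrr]; exact List.mem_cons_self)
          have hxh : x < h := lt_of_le_of_ne (hxt h hhmem) (Ne.symm hhx)
          have hrp : r.Pairwise (· ≤ ·) := ht.sublist (List.dropWhile_sublist _)
          rw [hrr] at hz hrp
          rcases List.mem_cons.mp hz with rfl | hz'
          · exact hxh
          · exact lt_of_lt_of_le hxh (List.rel_of_pairwise_cons hrp hz')
      have hxr : x ∉ r := fun h => absurd (hr x h) (lt_irrefl x)
      have hcount : (x :: t).count x = 1 + run.length := by
        rw [← hsplit]
        have h1 : run.count x = run.length := List.count_eq_length.mpr (fun y hy => by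
          simp [hrun y hy])
        have h2 : r.count x = 0 := List.count_eq_zero.mpr hxr
        simp [List.count_append, h1, h2]
        omega
      have hds : dsTail x r = dedupSorted r := by
        cases hrr : r with
        | nil => simp [dsTail, dedupSorted]
        | cons h r' =>
          have hh : h ≠ x := by
            have := hr h (by rw [hrr]; exact List.mem_cons_self)
            omega
          rw [dedupSorted_cons]
          simp [dsTail, hh]
      have hdst : dedupSorted (x :: t) = x :: dedupSorted r := by
        rw [dedupSorted_cons, ← hsplit, dsTail_skip x run r hrun, hds]
      have hrp : r.Pairwise (· ≤ ·) := ht.sublist (List.dropWhile_sublist _)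
      have hrlen : r.length ≤ N := by
        have := List.length_dropWhile_le (fun y => y == x) t
        have : r.length ≤ t.length := this
        simp only [List.length_cons] at hN
        omega
      have hcongr : (dedupSorted r).countP (fun n => decide ((x :: t).count n > 1)) =
          (dedupSorted r).countP (fun n => decide (r.count n > 1)) := by
        refine List.countP_congr fun n hn => ?_
        have hnr : n ∈ r := (mem_dedupSorted r hrp n).mp hn
        have hnx : x < n := hr n hnr
        have hcnt : (x :: t).count n = r.count n := by
          rw [← hsplit]
          have h1 : run.count n = 0 := List.count_eq_zero.mpr (fun h => by
            have := hrun n h; omega)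
          simp [List.count_cons, List.count_append, h1]
          omega
        rw [hcnt]
      rw [dupRuns, hdst, List.countP_cons, ← hrundef, ← hrdef]
      rw [hcongr]
      have hpx : (decide ((x :: t).count x > 1)) = decide (run.length + 1 > 1) := by
        rw [hcount]; by_cases h : run.length > 0 <;> simp [h]
      rw [ih r hrlen hrp]
      push_cast
      rw [hpx]
      simp [add_comm]

-- ===== VERDICT (by name: the statement is the Claim_ definition above) =====
theorem findPairs_spec : Claim_equal_findPairs := by
  unfold Claim_equal_findPairs
  intro nums k _
  unfold Spec_findPairs findPairs_alt
  rw [findPairs_eq_countP]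
  have hsp : (PySem.List.sorted nums (fun x => x) false).Pairwise (· ≤ ·) :=
    PySem.List.sorted_pairwise nums (fun x => x)
  have hperm_s : (PySem.List.sorted nums (fun x => x) false).Perm nums :=
    PySem.List.sorted_perm nums (fun x => x) false
  set s := PySem.List.sorted nums (fun x => x) false with hsdef
  have hu_pair : (dedupSorted s).Pairwise (· < ·) := pairwise_dedupSorted s hsp
  have hu_nodup : (dedupSorted s).Nodup := hu_pair.imp ne_of_lt
  have hu_mem : ∀ z, z ∈ dedupSorted s ↔ z ∈ nums := fun z => by
    rw [mem_dedupSorted s hsp z]; exact hperm_s.mem_iff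
  have hperm_u : (dedupSorted s).Perm (PySem.Set.ofList nums) := by
    apply List.perm_of_nodup_nodup_toFinset_eq hu_nodup (PySem.Set.nodup_ofList nums)
    ext z
    simp only [List.mem_toFinset]
    rw [hu_mem z, PySem.Set.mem_ofList]
  by_cases hneg : k < 0
  · rw [if_pos hneg]
    have : ∀ n, ((decide (k > 0) && decide ((n - k) ∈ nums)) ||
        (decide (k = 0) && decide (nums.count n > 1))) = false := by
      intro n
      simp [show ¬ k > 0 by omega, show k ≠ 0 by omega]
    rw [List.countP_eq_zero.mpr (fun n _ => by rw [this n]; exact Bool.false_ne_true)]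
    rfl
  · rw [if_neg hneg]
    by_cases hz : k = 0
    · rw [if_pos hz]
      subst hz
      rw [dupRuns_eq s.length s (le_refl _) hsp]
      rw [← hperm_u.countP_eq]
      congr 1
      refine List.countP_congr fun n _ => ?_
      rw [hperm_s.count_eq]
      simp
    · rw [if_neg hz]
      have hpos : k > 0 := by omega
      rw [mergeCount_eq k ((dedupSorted s).length + (dedupSorted s).length)
        (dedupSorted s) (dedupSorted s) (le_refl _) hu_pair hu_pair]
      rw [← hperm_u.countP_eq]
      congr 1
      refine List.countP_congr fun n _ => ?_
      have : ((n - k) ∈ dedupSorted s) ↔ ((n - k) ∈ nums) := hu_mem _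
      simp [hpos, show k ≠ 0 by omega, this]
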